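-- pv_equiv track=rewrite | github.com/AI-fergan/CTF-Events-Writeups | Bhil_2024/Minimath/solution/solve.py | calc_using_len
-- ===== SOURCE A (Python) =====
-- LEN_LINE = 'len("%s")'
--
-- def getn(n = 4):
--     """
--     This function return numbers string by using 'len()' func.
--     """
--     return (LEN_LINE % ("a" * n))
--
-- def calc_using_len(n):
--     """
--     This function return python line code with 'len()' functions that return number.
--     """
--     crr = 1
--     res = ""
--     if n <= 4: # Check if the number is too small
--         return (getn(n), 0)
--
--     # Create python line using 'len()' functions to calc the number
--     while n >= crr * 4:
--         crr *= 4
--         res += getn() + "*"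
--
--     # Remove the last '*' sign
--     res = res[:-1]
--
--     # Return tuple of the python line and the rest of the number
--     return (res, n - crr)
-- ===== SOURCE B (Python) =====
-- LEN_LINE = 'len("%s")'
--
-- def getn(n = 4):
--     return (LEN_LINE % ("a" * n))
--
-- def calc_using_len(n):
--     """
--     Same result as A: closed-form exponent via bit_length instead of a while-loop.
--     """
--     if n <= 4:
--         return (getn(n), 0)
--     k = (n.bit_length() - 1) // 2   # largest k with 4**k <= n
--     return ("*".join([getn()] * k), n - 4 ** k)
-- ===== Notes on version B (the rewrite author's own statement) =====
-- stated objective: simpler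
-- what changed: The while-loop that repeatedly multiplies crr by 4 while concatenating 'len("aaaa")*' is replaced by a closed-form exponent k = (n.bit_length()-1)//2 (largest k with 4**k <= n), a '*'.join of k copies, and remainder n - 4**k.
import Mathlib
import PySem

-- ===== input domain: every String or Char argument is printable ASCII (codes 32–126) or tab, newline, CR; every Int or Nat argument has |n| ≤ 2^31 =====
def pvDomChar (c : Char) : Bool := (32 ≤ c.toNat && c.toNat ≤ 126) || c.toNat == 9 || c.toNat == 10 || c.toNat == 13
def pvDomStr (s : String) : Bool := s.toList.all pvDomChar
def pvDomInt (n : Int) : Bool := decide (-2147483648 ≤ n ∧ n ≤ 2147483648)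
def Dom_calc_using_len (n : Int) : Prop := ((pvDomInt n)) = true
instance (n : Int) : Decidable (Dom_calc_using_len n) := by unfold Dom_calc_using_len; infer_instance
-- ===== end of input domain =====

-- B replaces A's while-loop by a closed-form exponent (bit_length) plus a join; same result, no speed claim.

-- ===== PORT A =====
-- getn(n) = 'len("%s")' % ("a" * n); Python's "a" * n with n ≤ 0 is "" — Int.toNat clamps the same way.
-- (shared by both ports: Source B keeps getn verbatim)
def pvGetnChars (n : Int) : List Char :=
  "len(\"".toList ++ List.replicate n.toNat 'a' ++ "\")".toList

-- the while-loop of A: while n >= crr*4: crr *= 4; res += getn() + "*"; then (res[:-1], n - crr)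
def pvLoopA (n crr : Int) (res : List Char) (h : 0 < crr) : List Char × Int :=
  if hc : crr * 4 ≤ n then
    pvLoopA n (crr * 4) (res ++ (pvGetnChars 4 ++ ['*'])) (by omega)
  else
    (PySem.List.slice res none (some (-1)), n - crr)
termination_by (n - crr).toNat
decreasing_by omega

def calc_using_len (n : Int) : String × Int :=
  if n ≤ 4 then (String.ofList (pvGetnChars n), 0)
  else
    let r := pvLoopA n 1 [] (by omega)
    (String.ofList r.1, r.2)

-- ===== PORT B =====
-- k = (n.bit_length() - 1) // 2; for n ≥ 5 bit_length ≥ 3, so Python's floor division is Nat division.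
def calc_using_len_alt (n : Int) : String × Int :=
  if n ≤ 4 then (String.ofList (pvGetnChars n), 0)
  else
    let k : Nat := (PySem.Int.bitLength n - 1) / 2
    (String.ofList (List.intercalate ['*'] (List.replicate k (pvGetnChars 4))), n - 4 ^ k)

-- ===== PRECONDITION & SPEC =====
def Spec_calc_using_len (n : Int) (out : String × Int) : Prop := out = calc_using_len_alt n
instance (n : Int) (out : String × Int) : Decidable (Spec_calc_using_len n out) := by unfold Spec_calc_using_len; infer_instance

-- ===== CLAIM (what is proved, stated in full; the proofs are below) =====
def Claim_equal_calc_using_len : Prop := ∀ (n : Int), Dom_calc_using_len n → Spec_calc_using_len n (calc_using_len n)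

-- ===== LEMMAS AND PROOFS =====

-- k copies of getn()+"*", as appended by A's loop
def pvRep : Nat → List Char
  | 0 => []
  | k + 1 => (pvGetnChars 4 ++ ['*']) ++ pvRep k

lemma pvLoopA_spec (k : Nat) : ∀ (n crr : Int) (res : List Char) (h : 0 < crr),
    crr * 4 ^ k ≤ n → n < crr * 4 ^ (k + 1) →
    pvLoopA n crr res h =
      (PySem.List.slice (res ++ pvRep k) none (some (-1)), n - crr * 4 ^ k) := by
  induction k with
  | zero =>
    intro n crr res h h1 h2
    rw [pvLoopA]
    have hc : ¬ crr * 4 ≤ n := by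
      simp [pow_succ, pow_zero] at h2; omega
    simp [hc, pvRep]
  | succ k ih =>
    intro n crr res h h1 h2
    have h4 : (1:Int) ≤ 4 ^ k := one_le_pow₀ (by omega)
    have hc : crr * 4 ≤ n := by
      have : crr * 4 * 4 ^ k ≤ n := by
        calc crr * 4 * 4 ^ k = crr * 4 ^ (k + 1) := by ring
        _ ≤ n := h1
      nlinarith
    rw [pvLoopA]
    simp only [hc, dite_true]
    rw [ih n (crr * 4) _ (by omega)
        (by rw [show crr * 4 * 4 ^ k = crr * 4 ^ (k + 1) from by ring]; exact h1)
        (by rw [show crr * 4 * 4 ^ (k + 1) = crr * 4 ^ (k + 1 + 1) from by ring]; exact h2)]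
    simp only [Prod.mk.injEq]
    exact ⟨by rw [show pvRep (k + 1) = (pvGetnChars 4 ++ ['*']) ++ pvRep k from rfl, List.append_assoc], by ring⟩

lemma pvRep_dropLast (k : Nat) :
    (pvRep (k + 1)).dropLast = List.intercalate ['*'] (List.replicate (k + 1) (pvGetnChars 4)) := by
  induction k with
  | zero =>
    simp [pvRep, List.intercalate]
  | succ k ih =>
    have hne : pvRep (k + 1) ≠ [] := by simp [pvRep]
    rw [show pvRep (k + 2) = (pvGetnChars 4 ++ ['*']) ++ pvRep (k + 1) from rfl,
        List.dropLast_append_of_ne_nil hne, ih]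
    rw [show List.replicate (k + 2) (pvGetnChars 4) = pvGetnChars 4 :: pvGetnChars 4 :: List.replicate k (pvGetnChars 4) from rfl,
        show List.replicate (k + 1) (pvGetnChars 4) = pvGetnChars 4 :: List.replicate k (pvGetnChars 4) from rfl]
    simp [List.intercalate, List.intersperse]

-- for 5 ≤ n, K := (bitLength n - 1)/2 satisfies 4^K ≤ n < 4^(K+1), and K ≥ 1
lemma pvBracket (n : Int) (K : Nat) (hn : 5 ≤ n)
    (hKdef : K = (PySem.Int.bitLength n - 1) / 2) :
    1 ≤ K ∧ (4:Int) ^ K ≤ n ∧ n < 4 ^ (K + 1) := by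
  have hne : n ≠ 0 := by omega
  have hlo := PySem.Int.two_pow_bitLength_le n hne
  have hhi := PySem.Int.lt_two_pow_bitLength n
  have habs : (n.natAbs : Int) = n := Int.natAbs_of_nonneg (by omega)
  generalize hbb : PySem.Int.bitLength n = b at hlo hhi hKdef
  have h5 : 5 ≤ n.natAbs := by omega
  have hb3 : 3 ≤ b := by
    by_contra h
    interval_cases b <;> simp_all <;> omega
  have hK1 : 1 ≤ K := by omega
  refine ⟨hK1, ?_, ?_⟩
  · have h1 : 2 * K ≤ b - 1 := by omega
    have : (2:Nat) ^ (2 * K) ≤ 2 ^ (b - 1) := Nat.pow_le_pow_right (by omega) h1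
    have hle : (2:Nat) ^ (2 * K) ≤ n.natAbs := le_trans this hlo
    calc (4:Int) ^ K = ((2:Nat) ^ (2 * K) : Nat) := by
          push_cast [pow_mul]; norm_num
      _ ≤ (n.natAbs : Int) := by exact_mod_cast hle
      _ = n := habs
  · have h2 : b ≤ 2 * K + 2 := by omega
    have : (2:Nat) ^ b ≤ 2 ^ (2 * K + 2) := Nat.pow_le_pow_right (by omega) h2
    have hlt : n.natAbs < 2 ^ (2 * K + 2) := lt_of_lt_of_le hhi this
    calc n = (n.natAbs : Int) := habs.symm
      _ < ((2:Nat) ^ (2 * K + 2) : Nat) := by exact_mod_cast hlt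
      _ = 4 ^ (K + 1) := by push_cast [pow_succ, pow_mul]; ring

-- ===== VERDICT (by name: the statement is the Claim_ definition above) =====
theorem calc_using_len_spec : Claim_equal_calc_using_len := by
  intro n _
  unfold Spec_calc_using_len calc_using_len calc_using_len_alt
  by_cases h4 : n ≤ 4
  · simp [h4]
  · simp only [h4, if_false]
    have hn : 5 ≤ n := by omega
    obtain ⟨hK1, hlo, hhi⟩ := pvBracket n ((PySem.Int.bitLength n - 1) / 2) hn rfl
    set K := (PySem.Int.bitLength n - 1) / 2 with hK
    clear_value K
    rw [pvLoopA_spec K n 1 [] (by omega) (by simpa using hlo) (by simpa using hhi)]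
    obtain ⟨k, rfl⟩ : ∃ k, K = k + 1 := ⟨K - 1, by omega⟩
    simp [PySem.List.slice_to_neg_one, pvRep_dropLast k]
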